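-- pv_equiv track=rewrite | github.com/offbynull/offbynull.github.io | docs/data/learn/Bioinformatics/input/ch9_code/src/sequence_search/BurrowsWheelerTransform_Deserialization.py | cmp_symbol
-- ===== SOURCE A (Python) =====
-- def cmp_symbol(a: str, b: str, end_marker: str):
--     if len(a) != len(b):
--         raise '???'
--     for a_ch, b_ch in zip(a, b):
--         if a_ch == end_marker and b_ch == end_marker:
--             continue
--         if a_ch == end_marker:
--             return -1
--         if b_ch == end_marker:
--             return 1
--         if a_ch < b_ch:
--             return -1
--         if a_ch > b_ch:
--             return 1
--     return 0
-- ===== SOURCE B (Python) =====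
-- def cmp_symbol(a: str, b: str, end_marker: str):
--     if len(a) != len(b):
--         raise ValueError('length mismatch')
--     ka = [(0,) if ch == end_marker else (1, ch) for ch in a]
--     kb = [(0,) if ch == end_marker else (1, ch) for ch in b]
--     return (ka > kb) - (ka < kb)
-- ===== Notes on version B (the rewrite author's own statement) =====
-- stated objective: idiomatic
-- what changed: Replaces the per-character five-branch ladder with a key transform (end marker maps below every real character) followed by a single built-in lexicographic list comparison yielding -1/0/1.
import Mathlib
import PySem

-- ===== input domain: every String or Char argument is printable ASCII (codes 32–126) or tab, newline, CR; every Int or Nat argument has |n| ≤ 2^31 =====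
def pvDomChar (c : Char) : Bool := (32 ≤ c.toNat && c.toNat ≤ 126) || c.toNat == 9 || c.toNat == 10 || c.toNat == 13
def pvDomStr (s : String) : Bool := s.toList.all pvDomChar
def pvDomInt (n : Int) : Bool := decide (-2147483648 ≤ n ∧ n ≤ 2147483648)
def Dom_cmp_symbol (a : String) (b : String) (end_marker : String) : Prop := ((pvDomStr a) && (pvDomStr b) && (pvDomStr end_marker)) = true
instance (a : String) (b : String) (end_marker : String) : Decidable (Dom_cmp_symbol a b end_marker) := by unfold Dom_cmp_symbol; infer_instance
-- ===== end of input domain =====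

-- B replaces A's per-character branch ladder by a key transform plus one lexicographic
-- list comparison (idiomatic). Return-value equivalence on equal-length inputs; A raises
-- (a raise of a non-exception, a TypeError) on unequal lengths, which Pre_ excludes.

-- ===== PORT A =====
-- A's loop over zip(a, b): each branch in A's order; falling off a branchless
-- iteration (both markers, or equal chars) continues the loop.
def cmpSymbolLoop (em : List Char) : List (Char × Char) → Int
  | [] => 0
  | (ac, bc) :: rest =>
    if [ac] = em ∧ [bc] = em then cmpSymbolLoop em rest
    else if [ac] = em then -1
    else if [bc] = em then 1
    else if ac < bc then -1
    else if ac > bc then 1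
    else cmpSymbolLoop em rest

def cmp_symbol (a : String) (b : String) (end_marker : String) : Int :=
  if a.toList.length ≠ b.toList.length then 0  -- Python raises here; excluded by Pre_
  else cmpSymbolLoop end_marker.toList (a.toList.zip b.toList)

-- ===== PORT B =====
-- key of one character: (0,) for the end marker (below everything), (1, ch) otherwise;
-- encoded as Option Char with none < some _.
def pvKeyOf (em : List Char) (ch : Char) : Option Char :=
  if [ch] = em then none else some ch

-- Python's `<` on the two key lists (lexicographic; keys of unequal tags compare by tag).
def pvKeyLt : Option Char → Option Char → Bool
  | none, none => false
  | none, some _ => true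
  | some _, none => false
  | some x, some y => x < y

def pvKeysLt : List (Option Char) → List (Option Char) → Bool
  | _, [] => false
  | [], _ :: _ => true
  | x :: xs, y :: ys => if x = y then pvKeysLt xs ys else pvKeyLt x y

def cmp_symbol_alt (a : String) (b : String) (end_marker : String) : Int :=
  if a.toList.length ≠ b.toList.length then 0  -- B raises ValueError here; excluded by Pre_
  else
    let ka := a.toList.map (pvKeyOf end_marker.toList)
    let kb := b.toList.map (pvKeyOf end_marker.toList)
    (if pvKeysLt kb ka then (1 : Int) else 0) - (if pvKeysLt ka kb then 1 else 0)

-- ===== PRECONDITION & SPEC =====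
-- Pre_ excludes exactly the inputs with len(a) != len(b), on which A raises (TypeError).
def Pre_cmp_symbol (a : String) (b : String) (end_marker : String) : Prop :=
  a.toList.length = b.toList.length
instance (a : String) (b : String) (end_marker : String) : Decidable (Pre_cmp_symbol a b end_marker) := by unfold Pre_cmp_symbol; infer_instance

def pvWitness_cmp_symbol : String × String × String := ("ab$", "a$b", "$")

def Spec_cmp_symbol (a : String) (b : String) (end_marker : String) (out : Int) : Prop := out = cmp_symbol_alt a b end_marker
instance (a : String) (b : String) (end_marker : String) (out : Int) : Decidable (Spec_cmp_symbol a b end_marker out) := by unfold Spec_cmp_symbol; infer_instance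

-- ===== CLAIM (what is proved, stated in full; the proofs are below) =====
def Claim_equal_cmp_symbol : Prop := ∀ (a : String) (b : String) (end_marker : String), Dom_cmp_symbol a b end_marker → Pre_cmp_symbol a b end_marker → Spec_cmp_symbol a b end_marker (cmp_symbol a b end_marker)

-- ===== LEMMAS AND PROOFS =====

theorem cmpLoop_eq_keys (em : List Char) :
    ∀ (xs ys : List Char), xs.length = ys.length →
    cmpSymbolLoop em (xs.zip ys) =
      (if pvKeysLt (ys.map (pvKeyOf em)) (xs.map (pvKeyOf em)) then (1 : Int) else 0)
      - (if pvKeysLt (xs.map (pvKeyOf em)) (ys.map (pvKeyOf em)) then 1 else 0) := by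
  intro xs
  induction xs with
  | nil =>
    intro ys h
    cases ys with
    | nil => simp [cmpSymbolLoop, pvKeysLt]
    | cons y ys => simp at h
  | cons x xs ih =>
    intro ys h
    cases ys with
    | nil => simp at h
    | cons y ys =>
      simp only [List.length_cons, Nat.add_right_cancel_iff] at h
      simp only [List.zip_cons_cons, List.map_cons, cmpSymbolLoop]
      by_cases hx : [x] = em <;> by_cases hy : [y] = em
      · simp [hx, hy, pvKeyOf, pvKeysLt, ih ys h]
      · simp [hx, hy, pvKeyOf, pvKeysLt, pvKeyLt]
      · simp [hx, hy, pvKeyOf, pvKeysLt, pvKeyLt]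
      · simp only [hx, hy, pvKeyOf, and_false, if_false]
        by_cases hlt : x < y
        · have hne : x ≠ y := ne_of_lt hlt
          simp [hlt, pvKeysLt, pvKeyLt, hne, Ne.symm hne, not_lt_of_gt hlt]
        · by_cases hgt : y < x
          · have hne : x ≠ y := (ne_of_lt hgt).symm
            simp [hlt, hgt, pvKeysLt, pvKeyLt, hne, Ne.symm hne]
          · have heq : x = y := le_antisymm (not_lt.mp hgt) (not_lt.mp hlt)
            subst heq
            simp [pvKeysLt, ih ys h]

-- ===== VERDICT (by name: the statement is the Claim_ definition above) =====
theorem cmp_symbol_spec : Claim_equal_cmp_symbol := by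
  intro a b em _ hpre
  unfold Spec_cmp_symbol cmp_symbol cmp_symbol_alt
  rw [if_neg (fun h => h hpre), if_neg (fun h => h hpre)]
  exact cmpLoop_eq_keys em.toList a.toList b.toList hpre
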